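-- pv_equiv track=rewrite | github.com/maddakam-mallikarjuna/My_leetCode_Solves | Bitwise XOR of All Pairings.py | xorAllNums
-- ===== SOURCE A (Python) =====
-- from typing import List
--
-- def xorAllNums(nums1: List[int], nums2: List[int]) -> int:
--     #Time Complexity: O(n + m), where `n` is the length of nums1 and `m` is the length of nums2.
--     #Space Complexity: O(1), as no additional space is used beyond variables.
--     l1 = len(nums1)  # Length of nums1.
--     l2 = len(nums2)  # Length of nums2.
--
--     xor = 0  # Initialize the XOR result.
--
--     # If nums1 has an odd number of elements, each element of nums2 will appear in the result an odd number of times.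
--     if l1 % 2 != 0:
--         for val in nums2:
--             xor ^= val  # XOR all elements of nums2.
--
--     # If nums2 has an odd number of elements, each element of nums1 will appear in the result an odd number of times.
--     if l2 % 2 != 0:
--         for val in nums1:
--             xor ^= val  # XOR all elements of nums1.
--
--     return xor  # Return the final XOR value.
-- ===== SOURCE B (Python) =====
-- from typing import List
--
-- def xorAllNums(nums1: List[int], nums2: List[int]) -> int:
--     # Brute force straight from the definition: XOR of every pairwise XOR.
--     result = 0
--     for a in nums1:
--         for b in nums2:
--             result ^= (a ^ b)
--     return result
-- ===== Notes on version B (the rewrite author's own statement) =====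
-- stated objective: alternative
-- what changed: B computes the XOR of all pairwise XORs directly with a nested double loop over every pair, instead of A's parity trick that conditionally XORs each whole array once based on the other array's length parity.
import Mathlib
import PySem

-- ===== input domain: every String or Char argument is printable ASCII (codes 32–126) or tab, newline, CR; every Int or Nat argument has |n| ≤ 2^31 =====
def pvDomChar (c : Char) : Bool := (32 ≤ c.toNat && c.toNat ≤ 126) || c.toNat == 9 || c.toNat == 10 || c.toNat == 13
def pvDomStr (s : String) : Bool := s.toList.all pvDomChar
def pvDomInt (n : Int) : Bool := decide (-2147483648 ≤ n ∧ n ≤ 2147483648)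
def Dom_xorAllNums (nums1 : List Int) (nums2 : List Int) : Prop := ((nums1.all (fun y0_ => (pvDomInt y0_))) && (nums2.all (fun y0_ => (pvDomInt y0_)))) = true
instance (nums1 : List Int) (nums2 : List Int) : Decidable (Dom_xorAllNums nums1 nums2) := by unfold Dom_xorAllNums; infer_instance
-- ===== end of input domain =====

-- B replaces A's length-parity trick by the definitional nested double loop over all pairs (alternative algorithm, not faster).


-- ===== PORT A =====
def xorAllNums (nums1 : List Int) (nums2 : List Int) : Int :=
  let l1 : Int := nums1.length
  let l2 : Int := nums2.length
  let xor0 : Int := 0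
  let xor1 : Int :=
    if PySem.Int.mod l1 2 ≠ 0 then nums2.foldl (fun x v => PySem.Int.bxor x v) xor0 else xor0
  let xor2 : Int :=
    if PySem.Int.mod l2 2 ≠ 0 then nums1.foldl (fun x v => PySem.Int.bxor x v) xor1 else xor1
  xor2

-- ===== PORT B =====
def xorAllNums_alt (nums1 : List Int) (nums2 : List Int) : Int :=
  nums1.foldl (fun res a => nums2.foldl (fun r b => PySem.Int.bxor r (PySem.Int.bxor a b)) res) 0

-- ===== PRECONDITION & SPEC =====
def Spec_xorAllNums (nums1 : List Int) (nums2 : List Int) (out : Int) : Prop := out = xorAllNums_alt nums1 nums2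
instance (nums1 : List Int) (nums2 : List Int) (out : Int) : Decidable (Spec_xorAllNums nums1 nums2 out) := by unfold Spec_xorAllNums; infer_instance

-- ===== CLAIM (what is proved, stated in full; the proofs are below) =====
def Claim_equal_xorAllNums : Prop := ∀ (nums1 : List Int) (nums2 : List Int), Dom_xorAllNums nums1 nums2 → Spec_xorAllNums nums1 nums2 (xorAllNums nums1 nums2)

-- ===== LEMMAS AND PROOFS =====

-- sign/magnitude decomposition of Python's two's-complement xor, used to prove associativity
def pvBits (a : Int) : Nat := if 0 ≤ a then a.toNat else (-a - 1).toNat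
def pvDec (s : Bool) (n : Nat) : Int := if s then -(n : Int) - 1 else (n : Int)

theorem bxor_eq_dec (a b : Int) :
    PySem.Int.bxor a b = pvDec (xor (decide (a < 0)) (decide (b < 0))) (pvBits a ^^^ pvBits b) := by
  by_cases ha : 0 ≤ a <;> by_cases hb : 0 ≤ b <;>
    simp [PySem.Int.bxor, pvBits, pvDec, ha, hb] <;> omega

theorem bits_dec (s : Bool) (n : Nat) : pvBits (pvDec s n) = n := by
  cases s <;> simp [pvBits, pvDec] <;> omega

theorem neg_dec (s : Bool) (n : Nat) : decide (pvDec s n < 0) = s := by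
  cases s <;> simp [pvDec] <;> omega

theorem bxor_assoc (a b c : Int) :
    PySem.Int.bxor (PySem.Int.bxor a b) c = PySem.Int.bxor a (PySem.Int.bxor b c) := by
  rw [bxor_eq_dec a b, bxor_eq_dec b c,
      bxor_eq_dec (pvDec (xor (decide (a < 0)) (decide (b < 0))) (pvBits a ^^^ pvBits b)) c,
      bxor_eq_dec a (pvDec (xor (decide (b < 0)) (decide (c < 0))) (pvBits b ^^^ pvBits c)),
      bits_dec, bits_dec, neg_dec, neg_dec, Bool.xor_assoc, Nat.xor_assoc]

theorem zero_bxor (a : Int) : PySem.Int.bxor 0 a = a := by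
  rw [PySem.Int.bxor_comm]; exact PySem.Int.bxor_zero a

theorem bxor_cancel (a c : Int) : PySem.Int.bxor a (PySem.Int.bxor a c) = c := by
  rw [← bxor_assoc, PySem.Int.bxor_self, zero_bxor]

theorem bxor_left_comm (a b c : Int) :
    PySem.Int.bxor a (PySem.Int.bxor b c) = PySem.Int.bxor b (PySem.Int.bxor a c) := by
  rw [← bxor_assoc, PySem.Int.bxor_comm a b, bxor_assoc]

-- any foldl that only XORs something onto the accumulator factors through acc = 0
theorem foldl_bxor_shift {α : Type} (g : α → Int) (l : List α) (acc : Int) :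
    l.foldl (fun r x => PySem.Int.bxor r (g x)) acc
      = PySem.Int.bxor acc (l.foldl (fun r x => PySem.Int.bxor r (g x)) 0) := by
  induction l generalizing acc with
  | nil => simp [PySem.Int.bxor_zero]
  | cons x t ih =>
    simp only [List.foldl_cons]
    rw [ih (PySem.Int.bxor acc (g x)), ih (PySem.Int.bxor 0 (g x)), zero_bxor, bxor_assoc]

-- the inner loop of B: XOR of (a ^ b) over b ∈ l
theorem inner_eval (a : Int) (l : List Int) :
    l.foldl (fun r b => PySem.Int.bxor r (PySem.Int.bxor a b)) 0
      = PySem.Int.bxor (if l.length % 2 = 1 then a else 0)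
                       (l.foldl (fun r b => PySem.Int.bxor r b) 0) := by
  induction l with
  | nil => simp
  | cons b t ih =>
    simp only [List.foldl_cons]
    rw [foldl_bxor_shift (fun x => PySem.Int.bxor a x), ih,
        foldl_bxor_shift (fun x => x) t (PySem.Int.bxor 0 b)]
    simp only [zero_bxor, List.length_cons]
    rcases Nat.mod_two_eq_zero_or_one t.length with h | h <;>
      simp [h, Nat.add_mod, bxor_left_comm, PySem.Int.bxor_comm, zero_bxor, bxor_cancel]

-- the outer loop of B also only XORs onto its accumulator
theorem outer_shift (nums2 : List Int) (t : List Int) (acc : Int) :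
    t.foldl (fun res a => nums2.foldl (fun r b => PySem.Int.bxor r (PySem.Int.bxor a b)) res) acc
      = PySem.Int.bxor acc
          (t.foldl (fun res a => nums2.foldl (fun r b => PySem.Int.bxor r (PySem.Int.bxor a b)) res) 0) := by
  induction t generalizing acc with
  | nil => simp [PySem.Int.bxor_zero]
  | cons x t ih =>
    simp only [List.foldl_cons]
    rw [foldl_bxor_shift (fun b => PySem.Int.bxor x b) nums2 acc,
        foldl_bxor_shift (fun b => PySem.Int.bxor x b) nums2 0, zero_bxor,
        ih (PySem.Int.bxor acc (List.foldl (fun r b => PySem.Int.bxor r (PySem.Int.bxor x b)) 0 nums2)),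
        ih (List.foldl (fun r b => PySem.Int.bxor r (PySem.Int.bxor x b)) 0 nums2), bxor_assoc]

-- B's nested loop equals the parity characterisation
theorem alt_eval (nums1 nums2 : List Int) :
    xorAllNums_alt nums1 nums2
      = PySem.Int.bxor
          (if nums1.length % 2 = 1 then nums2.foldl (fun r b => PySem.Int.bxor r b) 0 else 0)
          (if nums2.length % 2 = 1 then nums1.foldl (fun r b => PySem.Int.bxor r b) 0 else 0) := by
  unfold xorAllNums_alt
  induction nums1 with
  | nil => simp
  | cons a t ih =>
    simp only [List.foldl_cons]
    rw [foldl_bxor_shift (fun b => PySem.Int.bxor a b) nums2 0, zero_bxor,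
        outer_shift, ih, inner_eval,
        foldl_bxor_shift (fun x => x) t (PySem.Int.bxor 0 a)]
    simp only [zero_bxor, List.length_cons]
    rcases Nat.mod_two_eq_zero_or_one t.length with h1 | h1 <;>
      rcases Nat.mod_two_eq_zero_or_one nums2.length with h2 | h2 <;>
      simp [h1, h2, Nat.add_mod, bxor_left_comm, PySem.Int.bxor_comm, zero_bxor, bxor_cancel]

-- A equals the same parity characterisation
theorem a_eval (nums1 nums2 : List Int) :
    xorAllNums nums1 nums2
      = PySem.Int.bxor
          (if nums1.length % 2 = 1 then nums2.foldl (fun r b => PySem.Int.bxor r b) 0 else 0)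
          (if nums2.length % 2 = 1 then nums1.foldl (fun r b => PySem.Int.bxor r b) 0 else 0) := by
  unfold xorAllNums
  simp only [PySem.Int.mod_eq_emod_of_pos (a := (nums1.length : Int)) (by norm_num : (0:Int) < 2),
    PySem.Int.mod_eq_emod_of_pos (a := (nums2.length : Int)) (by norm_num : (0:Int) < 2)]
  have h1 : ((nums1.length : Int) % 2 ≠ 0) ↔ (nums1.length % 2 = 1) := by omega
  have h2 : ((nums2.length : Int) % 2 ≠ 0) ↔ (nums2.length % 2 = 1) := by omega
  rcases Nat.mod_two_eq_zero_or_one nums1.length with p1 | p1 <;>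
    rcases Nat.mod_two_eq_zero_or_one nums2.length with p2 | p2 <;>
    simp [h1, h2, p1, p2, zero_bxor, PySem.Int.bxor_comm,
      foldl_bxor_shift (fun x => x) nums1 (nums2.foldl (fun r b => PySem.Int.bxor r b) 0)]

-- ===== VERDICT (by name: the statement is the Claim_ definition above) =====
theorem xorAllNums_spec : Claim_equal_xorAllNums := by
  intro nums1 nums2 _
  unfold Spec_xorAllNums
  rw [a_eval, alt_eval]
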